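-- pv_equiv track=rewrite | github.com/KodCode-AI/kodcode | demo/SFT_KodCode_leetcode_100_1741214688/cross_verification_SFT_KodCode_leetcode_100_1741214688/Leetcode_00000056_I/trial_r1_2/solution.py | max_distinct_elements_in_subarray
-- ===== SOURCE A (Python) =====
-- from collections import defaultdict
--
-- def max_distinct_elements_in_subarray(nums, k):
--     n = len(nums)
--     if k == 0 or k > n:
--         return 0
--     freq = defaultdict(int)
--     distinct = 0
--     # Initialize the first window
--     for i in range(k):
--         num = nums[i]
--         if freq[num] == 0:
--             distinct += 1
--         freq[num] += 1
--     max_distinct = distinct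
--     # Slide the window through the array
--     for i in range(n - k):
--         # Remove the leftmost element of the previous window
--         left = nums[i]
--         freq[left] -= 1
--         if freq[left] == 0:
--             distinct -= 1
--         # Add the new right element
--         right = nums[i + k]
--         if freq[right] == 0:
--             distinct += 1
--         freq[right] += 1
--         # Update the maximum number of distinct elements
--         if distinct > max_distinct:
--             max_distinct = distinct
--     return max_distinct
-- ===== SOURCE B (Python) =====
-- def max_distinct_elements_in_subarray(nums, k):
--     n = len(nums)
--     if k <= 0 or k > n:
--         return 0
--     return max(len(set(nums[i:i + k])) for i in range(n - k + 1))
-- ===== Notes on version B (the rewrite author's own statement) =====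
-- stated objective: simpler
-- what changed: Replaces the incremental sliding-window frequency map with a direct maximum over per-window distinct counts, building a fresh set for each length-k window.
import Mathlib
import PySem

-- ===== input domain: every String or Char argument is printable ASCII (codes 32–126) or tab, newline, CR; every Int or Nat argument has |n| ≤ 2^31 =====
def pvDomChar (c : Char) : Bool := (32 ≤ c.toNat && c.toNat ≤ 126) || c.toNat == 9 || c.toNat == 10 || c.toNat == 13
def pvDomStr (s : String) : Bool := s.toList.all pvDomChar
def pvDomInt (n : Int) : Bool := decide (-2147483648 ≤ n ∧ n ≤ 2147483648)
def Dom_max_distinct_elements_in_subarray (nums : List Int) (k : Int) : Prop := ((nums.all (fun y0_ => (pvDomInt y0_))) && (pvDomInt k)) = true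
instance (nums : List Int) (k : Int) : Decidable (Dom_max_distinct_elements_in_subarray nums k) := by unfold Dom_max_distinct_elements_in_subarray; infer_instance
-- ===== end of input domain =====

-- B replaces A's incremental sliding-window frequency map by a direct maximum of
-- per-window distinct counts (a fresh set per window): simpler, not faster.

-- ===== PORT A =====
-- the init loop body: read nums[i], bump distinct if unseen, increment its count
def pvInitStep (nums : List Int) (st : PySem.Dict Int Int × Int) (i : Int) :
    PySem.Dict Int Int × Int :=
  let num := PySem.List.pyGetD nums i 0
  let distinct := if st.1.getD num 0 = 0 then st.2 + 1 else st.2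
  (st.1.insert num (st.1.getD num 0 + 1), distinct)

-- the slide loop body: drop nums[i] on the left, add nums[i+k] on the right, track max
def pvSlideStep (nums : List Int) (k : Int) (st : PySem.Dict Int Int × Int × Int)
    (i : Int) : PySem.Dict Int Int × Int × Int :=
  let freq := st.1
  let distinct := st.2.1
  let maxd := st.2.2
  let left := PySem.List.pyGetD nums i 0
  let freq := freq.insert left (freq.getD left 0 - 1)
  let distinct := if freq.getD left 0 = 0 then distinct - 1 else distinct
  let right := PySem.List.pyGetD nums (i + k) 0
  let distinct := if freq.getD right 0 = 0 then distinct + 1 else distinct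
  let freq := freq.insert right (freq.getD right 0 + 1)
  let maxd := if distinct > maxd then distinct else maxd
  (freq, distinct, maxd)

def max_distinct_elements_in_subarray (nums : List Int) (k : Int) : Int :=
  let n : Int := (nums.length : Int)
  if k = 0 ∨ n < k then 0
  else
    let init := (PySem.List.pyRange 0 k).foldl (pvInitStep nums) (PySem.Dict.mk [], 0)
    let fin := (PySem.List.pyRange 0 (n - k)).foldl (pvSlideStep nums k)
      (init.1, init.2, init.2)
    fin.2.2

-- ===== PORT B =====
def max_distinct_elements_in_subarray_alt (nums : List Int) (k : Int) : Int :=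
  let n : Int := (nums.length : Int)
  if k ≤ 0 ∨ n < k then 0
  else
    ((PySem.List.max?
        ((PySem.List.pyRange 0 (n - k + 1)).map
          (fun i => ((PySem.Set.ofList
              (PySem.List.slice nums (some i) (some (i + k)))).length : Int)))
        (fun x => x)).getD 0)

-- ===== PRECONDITION & SPEC =====
-- Pre_ excludes exactly k < 0, where A raises IndexError (its slide loop reads nums[len(nums)]).
def Pre_max_distinct_elements_in_subarray (nums : List Int) (k : Int) : Prop := 0 ≤ k
instance (nums : List Int) (k : Int) : Decidable (Pre_max_distinct_elements_in_subarray nums k) := by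
  unfold Pre_max_distinct_elements_in_subarray; infer_instance

def pvWitness_max_distinct_elements_in_subarray : List Int × Int := ([1, 2, 2, 3], 2)

def Spec_max_distinct_elements_in_subarray (nums : List Int) (k : Int) (out : Int) : Prop := out = max_distinct_elements_in_subarray_alt nums k
instance (nums : List Int) (k : Int) (out : Int) : Decidable (Spec_max_distinct_elements_in_subarray nums k out) := by unfold Spec_max_distinct_elements_in_subarray; infer_instance

-- ===== CLAIM (what is proved, stated in full; the proofs are below) =====
def Claim_equal_max_distinct_elements_in_subarray : Prop := ∀ (nums : List Int) (k : Int), Dom_max_distinct_elements_in_subarray nums k → Pre_max_distinct_elements_in_subarray nums k → Spec_max_distinct_elements_in_subarray nums k (max_distinct_elements_in_subarray nums k)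

-- ===== LEMMAS AND PROOFS =====

-- the window of length K starting at i, and its number of distinct elements
def pvWin (nums : List Int) (K i : Nat) : List Int := (nums.drop i).take K
def pvD (nums : List Int) (K i : Nat) : Int := ((pvWin nums K i).toFinset.card : Int)

-- |set(xs)| is the number of distinct elements of xs
lemma pvSetLen (xs : List Int) :
    ((PySem.Set.ofList xs).length : Int) = (xs.toFinset.card : Int) := by
  have hnd := PySem.Set.nodup_ofList xs
  have hts : (PySem.Set.ofList xs).toFinset = xs.toFinset := by
    ext y; simp [List.mem_toFinset, PySem.Set.mem_ofList]
  have hlen := List.toFinset_card_of_nodup hnd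
  rw [hts] at hlen
  omega

-- invariant of A's init loop over the prefix of length j
lemma pvInitInv (nums : List Int) (j : Nat) (hj : j ≤ nums.length) :
    (∀ x, (((List.range j).map (fun i : Nat => (i : Int))).foldl (pvInitStep nums)
        (PySem.Dict.mk [], 0)).1.getD x 0 = (((nums.take j).count x : Nat) : Int)) ∧
    (((List.range j).map (fun i : Nat => (i : Int))).foldl (pvInitStep nums)
        (PySem.Dict.mk [], 0)).2 = (((nums.take j).toFinset.card : Nat) : Int) := by
  induction j with
  | zero => simp [PySem.Dict.getD, PySem.Dict.get?]
  | succ j ih =>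
    have hjlt : j < nums.length := by omega
    obtain ⟨ihf, ihd⟩ := ih (by omega)
    rw [List.range_succ, List.map_append, List.foldl_append]
    set st := (((List.range j).map (fun i : Nat => (i : Int))).foldl (pvInitStep nums)
        (PySem.Dict.mk [], 0)) with hst
    simp only [List.map_cons, List.map_nil, List.foldl_cons, List.foldl_nil]
    have hnum : PySem.List.pyGetD nums (j : Int) 0 = nums[j] := by
      rw [PySem.List.pyGetD_natCast]; exact List.getD_eq_getElem nums 0 hjlt
    have htake : nums.take (j + 1) = nums.take j ++ [nums[j]] := by
      rw [List.take_succ]; simp [List.getElem?_eq_getElem hjlt]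
    have hcnt0 : st.1.getD nums[j] 0 = 0 ↔ nums[j] ∉ nums.take j := by
      rw [ihf]
      constructor
      · intro h hm
        have := List.count_pos_iff.mpr hm
        omega
      · intro hm
        simp [List.count_eq_zero.mpr hm]
    constructor
    · intro x
      unfold pvInitStep
      simp only [hnum]
      rw [PySem.Dict.getD_insert]
      by_cases hx : x = nums[j]
      · subst hx
        rw [if_pos rfl, ihf, htake, List.count_append, List.count_singleton]
        push_cast
        simp
      · rw [if_neg hx, ihf, htake, List.count_append]
        have h1 : List.count x [nums[j]] = 0 := by
          rw [List.count_eq_zero]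
          simp only [List.mem_singleton]
          exact hx
        rw [h1]
        simp
    · unfold pvInitStep
      simp only [hnum]
      have htf : (nums.take (j + 1)).toFinset = insert nums[j] (nums.take j).toFinset := by
        ext y
        rw [htake]
        simp only [List.mem_toFinset, List.mem_append, List.mem_singleton, Finset.mem_insert]
        tauto
      by_cases hmem : nums[j] ∈ nums.take j
      · rw [if_neg (by rw [hcnt0]; simp [hmem]), ihd, htf]
        rw [Finset.insert_eq_self.mpr (List.mem_toFinset.mpr hmem)]
      · rw [if_pos (hcnt0.mpr hmem), ihd, htf]
        rw [Finset.card_insert_of_notMem (by simp [hmem])]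
        push_cast; ring

-- invariant of A's slide loop
lemma pvSlideInv (nums : List Int) (K : Nat) (hK : 1 ≤ K) (hKn : K ≤ nums.length)
    (st0 : PySem.Dict Int Int × Int × Int)
    (h0f : ∀ x, st0.1.getD x 0 = (((pvWin nums K 0).count x : Nat) : Int))
    (h0d : st0.2.1 = pvD nums K 0) (h0m : st0.2.2 = pvD nums K 0)
    (j : Nat) (hj : j ≤ nums.length - K) :
    (∀ x, (((List.range j).map (fun i : Nat => (i : Int))).foldl
        (pvSlideStep nums (K : Int)) st0).1.getD x 0 = (((pvWin nums K j).count x : Nat) : Int)) ∧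
    (((List.range j).map (fun i : Nat => (i : Int))).foldl
        (pvSlideStep nums (K : Int)) st0).2.1 = pvD nums K j ∧
    (((List.range j).map (fun i : Nat => (i : Int))).foldl
        (pvSlideStep nums (K : Int)) st0).2.2 ∈ (List.range (j + 1)).map (pvD nums K) ∧
    (∀ y ∈ (List.range (j + 1)).map (pvD nums K),
      y ≤ (((List.range j).map (fun i : Nat => (i : Int))).foldl
        (pvSlideStep nums (K : Int)) st0).2.2) := by
  induction j with
  | zero =>
    refine ⟨h0f, h0d, ?_, ?_⟩
    · simp [h0m]
    · intro y hy
      simp at hy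
      simp [hy, h0m]
  | succ j ih =>
    obtain ⟨ihf, ihd, ihm, ihb⟩ := ih (by omega)
    rw [List.range_succ, List.map_append, List.foldl_append]
    set st := (((List.range j).map (fun i : Nat => (i : Int))).foldl
        (pvSlideStep nums (K : Int)) st0) with hst
    simp only [List.map_cons, List.map_nil, List.foldl_cons, List.foldl_nil]
    have hjK : j + K < nums.length := by omega
    have hjlt : j < nums.length := by omega
    have hwinj : pvWin nums K j = nums[j] :: (nums.drop (j + 1)).take (K - 1) := by
      unfold pvWin
      obtain ⟨K', hK'⟩ : ∃ K', K = K' + 1 := ⟨K - 1, by omega⟩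
      subst hK'
      rw [List.drop_eq_getElem_cons hjlt, List.take_succ_cons]
      norm_num
    have hwinj1 : pvWin nums K (j + 1) =
        (nums.drop (j + 1)).take (K - 1) ++ [nums[j + K]] := by
      unfold pvWin
      obtain ⟨K', hK'⟩ : ∃ K', K = K' + 1 := ⟨K - 1, by omega⟩
      subst hK'
      rw [List.take_add_one]
      have : (nums.drop (j + 1))[K']? = some nums[j + (K' + 1)] := by
        rw [List.getElem?_drop]
        rw [List.getElem?_eq_getElem (by omega)]
        have h' : j + 1 + K' = j + (K' + 1) := by omega
        simp only [h']
      simp [this]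
    set mid : List Int := (nums.drop (j + 1)).take (K - 1) with hmid
    have hleft : PySem.List.pyGetD nums (j : Int) 0 = nums[j] := by
      rw [PySem.List.pyGetD_natCast]; exact List.getD_eq_getElem nums 0 hjlt
    have hright : PySem.List.pyGetD nums ((j : Int) + (K : Int)) 0 = nums[j + K] := by
      have : (j : Int) + (K : Int) = ((j + K : Nat) : Int) := by push_cast; ring
      rw [this, PySem.List.pyGetD_natCast]; exact List.getD_eq_getElem nums 0 hjK
    -- the state after removing the left element
    have hf1 : ∀ x, (st.1.insert nums[j] (st.1.getD nums[j] 0 - 1)).getD x 0 =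
        ((mid.count x : Nat) : Int) := by
      intro x
      rw [PySem.Dict.getD_insert]
      by_cases hx : x = nums[j]
      · subst hx
        rw [if_pos rfl, ihf, hwinj, List.count_cons_self]
        push_cast; ring
      · rw [if_neg hx, ihf, hwinj, List.count_cons]
        have hne : ¬ nums[j] = x := fun h => hx h.symm
        simp [hne]
    have hd1 : (if ((mid.count nums[j] : Nat) : Int) = 0
          then st.2.1 - 1 else st.2.1) = ((mid.toFinset.card : Nat) : Int) := by
      rw [ihd]
      unfold pvD
      rw [hwinj]
      have htf : (nums[j] :: mid).toFinset = insert nums[j] mid.toFinset := by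
        simp
      by_cases hm : nums[j] ∈ mid
      · rw [if_neg (by have := List.count_pos_iff.mpr hm; omega)]
        rw [htf, Finset.insert_eq_self.mpr (List.mem_toFinset.mpr hm)]
      · rw [if_pos (by simp [List.count_eq_zero.mpr hm])]
        rw [htf, Finset.card_insert_of_notMem (by simp [hm])]
        push_cast; ring
    have hd2 : (if ((mid.count nums[j + K] : Nat) : Int) = 0
          then ((mid.toFinset.card : Nat) : Int) + 1 else ((mid.toFinset.card : Nat) : Int)) =
        pvD nums K (j + 1) := by
      unfold pvD
      rw [hwinj1]
      have htf : (mid ++ [nums[j + K]]).toFinset = insert nums[j + K] mid.toFinset := by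
        ext y
        simp only [List.mem_toFinset, List.mem_append, List.mem_singleton, Finset.mem_insert]
        tauto
      by_cases hm : nums[j + K] ∈ mid
      · rw [if_neg (by have := List.count_pos_iff.mpr hm; omega)]
        rw [htf, Finset.insert_eq_self.mpr (List.mem_toFinset.mpr hm)]
      · rw [if_pos (by simp [List.count_eq_zero.mpr hm])]
        rw [htf, Finset.card_insert_of_notMem (by simp [hm])]
        push_cast; ring
    have hf2 : ∀ x,
        ((st.1.insert nums[j] (st.1.getD nums[j] 0 - 1)).insert nums[j + K]
          (((mid.count nums[j + K] : Nat) : Int) + 1)).getD x 0 =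
        (((pvWin nums K (j + 1)).count x : Nat) : Int) := by
      intro x
      rw [PySem.Dict.getD_insert, hwinj1]
      by_cases hx : x = nums[j + K]
      · subst hx
        rw [if_pos rfl, List.count_append, List.count_singleton]
        push_cast
        simp
      · rw [if_neg hx, hf1, List.count_append]
        have h1 : List.count x [nums[j + K]] = 0 := by
          rw [List.count_eq_zero]
          simp only [List.mem_singleton]
          exact hx
        rw [h1]
        simp
    -- now put the step together
    simp only [pvSlideStep, hleft, hright]
    simp only [hf1]
    refine ⟨?_, ?_, ?_, ?_⟩
    · intro x
      exact hf2 x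
    · rw [hd1]
      exact hd2
    · rw [hd1, hd2]
      rw [List.range_succ (n := j + 1), List.map_append]
      by_cases hgt : pvD nums K (j + 1) > st.2.2
      · rw [if_pos hgt]
        simp
      · rw [if_neg hgt]
        exact List.mem_append_left _ ihm
    · intro y hy
      rw [hd1, hd2]
      rw [List.range_succ (n := j + 1), List.map_append] at hy
      simp only [List.mem_append, List.map_cons, List.map_nil, List.mem_singleton] at hy
      by_cases hgt : pvD nums K (j + 1) > st.2.2
      · rw [if_pos hgt]
        rcases hy with hy | hy
        · exact le_trans (ihb y hy) (le_of_lt hgt)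
        · simp [hy]
      · rw [if_neg hgt]
        rcases hy with hy | hy
        · exact ihb y hy
        · rw [hy]; omega

-- ===== VERDICT (by name: the statement is the Claim_ definition above) =====
theorem max_distinct_elements_in_subarray_spec : Claim_equal_max_distinct_elements_in_subarray := by
  intro nums k _ hpre
  unfold Spec_max_distinct_elements_in_subarray
  unfold max_distinct_elements_in_subarray max_distinct_elements_in_subarray_alt
  replace hpre : 0 ≤ k := hpre
  by_cases hc : k = 0 ∨ ((nums.length : Int) < k)
  · rw [if_pos hc, if_pos (by omega)]
  · push_neg at hc
    obtain ⟨hk0, hkn⟩ := hc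
    rw [if_neg (by omega), if_neg (by omega)]
    set K : Nat := k.toNat with hKdef
    have hkK : (K : Int) = k := Int.toNat_of_nonneg hpre
    have hK1 : 1 ≤ K := by omega
    have hKN : K ≤ nums.length := by omega
    -- the init loop
    have hr1 : PySem.List.pyRange 0 k = (List.range K).map (fun i : Nat => (i : Int)) := by
      rw [← hkK, PySem.List.pyRange_zero_natCast]
    have hwin0 : pvWin nums K 0 = nums.take K := by
      unfold pvWin; rw [List.drop_zero]
    obtain ⟨hif, hid⟩ := pvInitInv nums K hKN
    -- the slide loop
    have hr2 : PySem.List.pyRange 0 ((nums.length : Int) - k) =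
        (List.range (nums.length - K)).map (fun i : Nat => (i : Int)) := by
      have : (nums.length : Int) - k = ((nums.length - K : Nat) : Int) := by
        push_cast [hkK]; omega
      rw [this, PySem.List.pyRange_zero_natCast]
    rw [hr1, hr2]
    set init := ((List.range K).map (fun i : Nat => (i : Int))).foldl (pvInitStep nums)
      (PySem.Dict.mk [], 0) with hinit
    have hsl := pvSlideInv nums K hK1 hKN (init.1, init.2, init.2)
      (by intro x; rw [hwin0]; exact hif x)
      (by show init.2 = _; unfold pvD; rw [hwin0]; exact hid)
      (by show init.2 = _; unfold pvD; rw [hwin0]; exact hid)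
      (nums.length - K) (le_refl _)
    rw [hkK] at hsl
    obtain ⟨_, _, hmem, hbnd⟩ := hsl
    -- B's list of per-window distinct counts is the list of pvD values
    have hr3 : PySem.List.pyRange 0 ((nums.length : Int) - k + 1) =
        (List.range (nums.length - K + 1)).map (fun i : Nat => (i : Int)) := by
      have : (nums.length : Int) - k + 1 = ((nums.length - K + 1 : Nat) : Int) := by
        push_cast [hkK]; omega
      rw [this, PySem.List.pyRange_zero_natCast]
    have hvals : (PySem.List.pyRange 0 ((nums.length : Int) - k + 1)).map
          (fun i => ((PySem.Set.ofList
              (PySem.List.slice nums (some i) (some (i + k)))).length : Int)) =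
        (List.range (nums.length - K + 1)).map (pvD nums K) := by
      rw [hr3, List.map_map]
      apply List.map_congr_left
      intro i _
      show ((PySem.Set.ofList (PySem.List.slice nums (some (i : Int))
          (some ((i : Int) + k)))).length : Int) = pvD nums K i
      have hik : (i : Int) + k = ((i + K : Nat) : Int) := by push_cast [hkK]; omega
      rw [hik, PySem.List.slice_natCast, pvSetLen]
      unfold pvD pvWin
      have hsub : i + K - i = K := by omega
      rw [hsub]
    rw [hvals]
    -- both sides are the maximum of that nonempty list
    rcases hm : PySem.List.max? ((List.range (nums.length - K + 1)).map (pvD nums K))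
        (fun x => x) with _ | m
    · exfalso
      rw [PySem.List.max?_eq_none_iff] at hm
      have := congrArg List.length hm
      simp at this
    · have hmmem := PySem.List.max?_mem hm
      have hmle := PySem.List.max?_id_le hm
      simp only [Option.getD_some]
      exact le_antisymm (hmle _ hmem) (hbnd m hmmem)
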